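-- pv_equiv track=rewrite | github.com/Zoroa1885/Hidden_Markov_Mixture_Model | utils.py | get_ensemble_state
-- ===== SOURCE A (Python) =====
-- def get_ensemble_state(vector1, vector2):
--     combo_to_number = {}
--     counter = 0
--     combination = []
--
--     for i in range(len(vector1)):
--         combo = (vector1[i], vector2[i])
--         combination.append(combo)
--         if combo not in combo_to_number:
--             combo_to_number[combo] = counter
--             counter += 1
--
--     return [combo_to_number[combo] for combo in combination]
-- ===== SOURCE B (Python) =====
-- def get_ensemble_state(vector1, vector2):
--     n = len(vector1)
--     first = {}
--     for i in range(n - 1, -1, -1):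
--         first[(vector1[i], vector2[i])] = i
--     rank = {f: r for r, f in enumerate(sorted(first.values()))}
--     return [rank[first[(vector1[i], vector2[i])]] for i in range(n)]
-- ===== Notes on version B (the rewrite author's own statement) =====
-- stated objective: alternative
-- what changed: Instead of a dict with a running counter, B makes a reverse pass storing each pair's first-occurrence index (last write wins), sorts the distinct first indices, and emits each id as the rank (position) of its pair's first index in that sorted order.
import Mathlib
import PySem

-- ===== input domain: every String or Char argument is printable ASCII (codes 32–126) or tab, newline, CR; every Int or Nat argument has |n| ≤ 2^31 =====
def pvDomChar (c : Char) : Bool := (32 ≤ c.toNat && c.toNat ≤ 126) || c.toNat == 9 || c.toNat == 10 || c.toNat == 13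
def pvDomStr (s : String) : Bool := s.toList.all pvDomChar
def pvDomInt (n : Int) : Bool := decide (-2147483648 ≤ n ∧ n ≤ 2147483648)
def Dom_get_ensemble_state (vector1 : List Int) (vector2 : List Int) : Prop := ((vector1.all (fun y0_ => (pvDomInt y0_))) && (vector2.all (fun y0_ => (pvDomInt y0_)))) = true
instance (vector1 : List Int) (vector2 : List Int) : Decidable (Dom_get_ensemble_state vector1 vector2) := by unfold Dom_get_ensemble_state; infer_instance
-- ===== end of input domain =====

-- B replaces A's forward dict-with-running-counter by a different algorithm: a reverse pass records
-- each pair's first-occurrence index (last write wins), and ids are the ranks of those first indices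
-- in sorted order; objective: alternative.

-- ===== PORT A =====
-- loop body of A's for-loop (append combo; if new, record it with the counter)
def pvStepA (vector1 vector2 : List Int)
    (s : PySem.Dict (Int × Int) Int × Int × List (Int × Int)) (i : Int) :
    PySem.Dict (Int × Int) Int × Int × List (Int × Int) :=
  let combo := (PySem.List.pyGetD vector1 i 0, PySem.List.pyGetD vector2 i 0)
  let combination := s.2.2 ++ [combo]
  if s.1.contains combo = false then
    (s.1.insert combo s.2.1, s.2.1 + 1, combination)
  else
    (s.1, s.2.1, combination)

def get_ensemble_state (vector1 : List Int) (vector2 : List Int) : List Int :=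
  let st := (PySem.List.pyRange 0 vector1.length 1).foldl (pvStepA vector1 vector2)
    (PySem.Dict.empty, 0, [])
  st.2.2.map (fun combo => st.1.getD combo 0)

-- ===== PORT B =====
-- body of B's reverse pass: first[(vector1[i], vector2[i])] = i  (last write = smallest i wins)
def pvStepFirst (vector1 vector2 : List Int)
    (d : PySem.Dict (Int × Int) Int) (i : Int) : PySem.Dict (Int × Int) Int :=
  d.insert (PySem.List.pyGetD vector1 i 0, PySem.List.pyGetD vector2 i 0) i

-- body of B's dict comprehension {f: r for r, f in enumerate(sorted(first.values()))}
def pvStepRank (d : PySem.Dict Int Int) (p : Int × Int) : PySem.Dict Int Int :=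
  d.insert p.2 p.1

def get_ensemble_state_alt (vector1 : List Int) (vector2 : List Int) : List Int :=
  let n : Int := vector1.length
  let first := (PySem.List.pyRange (n - 1) (-1) (-1)).foldl (pvStepFirst vector1 vector2) PySem.Dict.empty
  let rank := (PySem.List.enumerate (PySem.List.sorted first.values (fun x => x) false) 0).foldl pvStepRank PySem.Dict.empty
  (PySem.List.pyRange 0 n 1).map (fun i =>
    rank.getD (first.getD (PySem.List.pyGetD vector1 i 0, PySem.List.pyGetD vector2 i 0) 0) 0)

-- ===== PRECONDITION & SPEC =====
-- A raises IndexError (vector2[i]) when vector2 is shorter than vector1; excluded.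
def Pre_get_ensemble_state (vector1 : List Int) (vector2 : List Int) : Prop :=
  vector1.length ≤ vector2.length
instance (vector1 : List Int) (vector2 : List Int) : Decidable (Pre_get_ensemble_state vector1 vector2) := by unfold Pre_get_ensemble_state; infer_instance
def pvWitness_get_ensemble_state : List Int × List Int := ([1, 2, 1], [5, 6, 5])

def Spec_get_ensemble_state (vector1 : List Int) (vector2 : List Int) (out : List Int) : Prop := out = get_ensemble_state_alt vector1 vector2
instance (vector1 : List Int) (vector2 : List Int) (out : List Int) : Decidable (Spec_get_ensemble_state vector1 vector2 out) := by unfold Spec_get_ensemble_state; infer_instance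

-- ===== CLAIM (what is proved, stated in full; the proofs are below) =====
def Claim_equal_get_ensemble_state : Prop := ∀ (vector1 : List Int) (vector2 : List Int), Dom_get_ensemble_state vector1 vector2 → Pre_get_ensemble_state vector1 vector2 → Spec_get_ensemble_state vector1 vector2 (get_ensemble_state vector1 vector2)

-- ===== LEMMAS AND PROOFS =====

-- the combo read at index i
def pvCombo (vector1 vector2 : List Int) (i : Int) : Int × Int :=
  (PySem.List.pyGetD vector1 i 0, PySem.List.pyGetD vector2 i 0)

-- the list of combos, in order
def pvCombos (vector1 vector2 : List Int) : List (Int × Int) :=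
  (PySem.List.pyRange 0 vector1.length 1).map (pvCombo vector1 vector2)

-- the value both programs compute at each position: the index of the combo in the ordered dedup
def pvSpecOut (cs : List (Int × Int)) : List Int :=
  cs.map (fun c => ((PySem.List.dedup cs).idxOf c : Int))

-- ---------- A side: the dict maps each combo to its index in the ordered dedup ----------

-- A's dict-building loop, over the combo list
def pvBuildL (cs : List (Int × Int)) : PySem.Dict (Int × Int) Int :=
  cs.foldl (fun d c => if d.contains c = false then d.insert c (d.size : Int) else d) PySem.Dict.empty

theorem pvBuildL_items (cs : List (Int × Int)) :
    (pvBuildL cs).items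
      = (PySem.List.enumerate (PySem.List.dedup cs) 0).map (fun p => (p.2, p.1)) := by
  induction cs using List.reverseRecOn with
  | nil => simp [pvBuildL, PySem.List.dedup, PySem.Set.ofList, PySem.Dict.empty]
  | append_singleton l c0 ih =>
    have hkeys : (pvBuildL l).keys = PySem.List.dedup l := by
      have h := congrArg (fun it => it.map Prod.fst) ih
      simp only [List.map_map] at h
      simpa [PySem.Dict.keys, Function.comp_def, PySem.List.map_snd_enumerate] using h
    have hcont : (pvBuildL l).contains c0 = decide (c0 ∈ l) := by
      by_cases h : c0 ∈ l
      · simp only [h, decide_true]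
        rw [PySem.Dict.contains_iff_mem_keys, hkeys]
        simpa [PySem.List.mem_dedup] using h
      · simp only [h, decide_false]
        by_contra hc
        rw [Bool.not_eq_false, PySem.Dict.contains_iff_mem_keys, hkeys] at hc
        simp at hc
        exact h hc
    have hsize : ((pvBuildL l).size : Int) = ((PySem.List.dedup l).length : Int) := by
      have := congrArg List.length ih
      simp only [PySem.Dict.size, this, List.length_map, PySem.List.length_enumerate]
    have hstep : pvBuildL (l ++ [c0])
        = if (pvBuildL l).contains c0 = false then (pvBuildL l).insert c0 ((pvBuildL l).size : Int)
          else pvBuildL l := by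
      simp [pvBuildL, List.foldl_append]
    rw [hstep, hcont]
    by_cases h : c0 ∈ l
    · have hd : PySem.List.dedup (l ++ [c0]) = PySem.List.dedup l := by
        simp only [PySem.List.dedup_eq_ofList, PySem.Set.ofList_append_singleton]
        simp [PySem.Set.add, PySem.Set.contains, h, PySem.Set.mem_ofList]
      rw [hd, if_neg (by simp [h]), ih]
    · have hd : PySem.List.dedup (l ++ [c0]) = PySem.List.dedup l ++ [c0] := by
        simp only [PySem.List.dedup_eq_ofList, PySem.Set.ofList_append_singleton]
        simp [PySem.Set.add, PySem.Set.contains, h, PySem.Set.mem_ofList]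
      rw [hd, if_pos (by simp [h]),
        PySem.Dict.items_insert_of_not_contains _ _ (by simp [hcont, h]), ih,
        PySem.List.enumerate_append]
      simp [hsize, PySem.List.enumerate_cons]

theorem pvBuildL_keys (cs : List (Int × Int)) :
    (pvBuildL cs).keys = PySem.List.dedup cs := by
  have h := congrArg (fun it => it.map Prod.fst) (pvBuildL_items cs)
  simp only [List.map_map] at h
  simpa [PySem.Dict.keys, Function.comp_def, PySem.List.map_snd_enumerate] using h

theorem pvBuildL_getD (cs : List (Int × Int)) (c : Int × Int) (hc : c ∈ cs) :
    (pvBuildL cs).getD c 0 = ((PySem.List.dedup cs).idxOf c : Int) := by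
  have hcd : c ∈ PySem.List.dedup cs := by simpa [PySem.List.mem_dedup] using hc
  have hlt : (PySem.List.dedup cs).idxOf c < (PySem.List.dedup cs).length :=
    List.idxOf_lt_length_of_mem hcd
  have hmem : (c, ((PySem.List.dedup cs).idxOf c : Int)) ∈ (pvBuildL cs).items := by
    rw [pvBuildL_items]
    refine List.mem_map.2 ⟨(((PySem.List.dedup cs).idxOf c : Int), c), ?_, rfl⟩
    rw [PySem.List.mem_enumerate_iff]
    exact ⟨(PySem.List.dedup cs).idxOf c, hlt, by simp⟩
  exact PySem.Dict.getD_of_mem_items _ hmem (by rw [pvBuildL_keys]; exact PySem.List.nodup_dedup cs) 0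

theorem pvAfold (vector1 vector2 : List Int) (is_ : List Int) :
    ∀ (d : PySem.Dict (Int × Int) Int) (cnt : Int) (comb : List (Int × Int)), cnt = (d.size : Int) →
      is_.foldl (pvStepA vector1 vector2) (d, cnt, comb)
      = ((is_.map (pvCombo vector1 vector2)).foldl
           (fun d c => if d.contains c = false then d.insert c (d.size : Int) else d) d,
         (((is_.map (pvCombo vector1 vector2)).foldl
           (fun d c => if d.contains c = false then d.insert c (d.size : Int) else d) d).size : Int),
         comb ++ is_.map (pvCombo vector1 vector2)) := by
  induction is_ with
  | nil => intro d cnt comb hcnt; simp [hcnt]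
  | cons i rest ih =>
    intro d cnt comb hcnt
    rw [List.map_cons, List.foldl_cons, List.foldl_cons]
    by_cases h : d.contains (pvCombo vector1 vector2 i) = false
    · rw [show pvStepA vector1 vector2 (d, cnt, comb) i
          = (d.insert (pvCombo vector1 vector2 i) cnt, cnt + 1, comb ++ [pvCombo vector1 vector2 i]) by
        simp [pvStepA, pvCombo] at h ⊢; simp [h]]
      rw [if_pos h, hcnt,
        ih (d.insert (pvCombo vector1 vector2 i) ((d.size : Int))) ((d.size : Int) + 1)
          (comb ++ [pvCombo vector1 vector2 i])
          (by rw [PySem.Dict.size_insert]; simp [h])]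
      simp
    · rw [show pvStepA vector1 vector2 (d, cnt, comb) i
          = (d, cnt, comb ++ [pvCombo vector1 vector2 i]) by
        simp [pvStepA, pvCombo] at h ⊢; simp [h]]
      rw [if_neg h, ih d cnt (comb ++ [pvCombo vector1 vector2 i]) hcnt]
      simp

theorem pvA_eq_spec (vector1 vector2 : List Int) :
    get_ensemble_state vector1 vector2 = pvSpecOut (pvCombos vector1 vector2) := by
  unfold get_ensemble_state
  rw [pvAfold vector1 vector2 _ PySem.Dict.empty 0 [] (by simp [PySem.Dict.empty, PySem.Dict.size])]
  show (([] ++ _).map _) = _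
  rw [List.nil_append]
  have hb : ((PySem.List.pyRange 0 (vector1.length : Int) 1).map (pvCombo vector1 vector2)).foldl
      (fun d c => if d.contains c = false then d.insert c (d.size : Int) else d) PySem.Dict.empty
      = pvBuildL (pvCombos vector1 vector2) := by
    rw [pvBuildL, pvCombos]
  rw [hb, pvSpecOut, show (PySem.List.pyRange 0 (vector1.length : Int) 1).map (pvCombo vector1 vector2) = pvCombos vector1 vector2 from rfl]
  exact List.map_congr_left (fun c hc => pvBuildL_getD _ c hc)

-- a fold of inserts over a REVERSED binding list: the FIRST binding of the original list wins
theorem pvRevInsert_get? (L : List ((Int × Int) × Int)) :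
    ∀ (d : PySem.Dict (Int × Int) Int) (c : Int × Int),
    ((L.reverse).foldl (fun d p => d.insert p.1 p.2) d).get? c
      = match L.find? (fun p => p.1 == c) with
        | some p => some p.2
        | none => d.get? c := by
  induction L with
  | nil => intro d c; simp
  | cons p t ih =>
    intro d c
    rw [List.reverse_cons, List.foldl_append]
    simp only [List.foldl_cons, List.foldl_nil, List.find?_cons]
    by_cases h : p.1 = c
    · rw [h, PySem.Dict.get?_insert_self]; simp
    · rw [PySem.Dict.get?_insert_of_ne _ _ (Ne.symm h), ih,
        show (p.1 == c) = false by simp [h]]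

theorem pvEnumFind (xs : List (Int × Int)) :
    ∀ (s : Int) (c : Int × Int), c ∈ xs →
    ((PySem.List.enumerate xs s).map (fun p => (p.2, p.1))).find? (fun p => p.1 == c)
      = some (c, s + (xs.idxOf c : Int)) := by
  induction xs with
  | nil => intro s c hc; simp at hc
  | cons x t ih =>
    intro s c hc
    rw [PySem.List.enumerate_cons, List.map_cons, List.find?_cons]
    by_cases h : x = c
    · simp [h]
    · have hct : c ∈ t := by
        cases hc with
        | head => exact absurd rfl h
        | tail _ h2 => exact h2
      have hx : ((x, s).1 == c) = false := by simp [h]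
      simp only [show (((s, x).2, (s, x).1).1 == c) = false from by simp [h]]
      rw [ih (s + 1) c hct]
      have h3 : (x :: t).idxOf c = t.idxOf c + 1 := by
        simp [List.idxOf_cons, show (x == c) = false from by simp [h]]
      rw [h3]
      congr 1
      push_cast
      ring_nf

theorem pvDedup_pairwise (cs : List (Int × Int)) :
    (PySem.List.dedup cs).Pairwise (fun a b => cs.idxOf a < cs.idxOf b) := by
  induction cs using List.reverseRecOn with
  | nil => simp [PySem.List.dedup, PySem.Set.ofList]
  | append_singleton l c0 ih =>
    by_cases h : c0 ∈ l
    · have hd : PySem.List.dedup (l ++ [c0]) = PySem.List.dedup l := by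
        simp only [PySem.List.dedup_eq_ofList, PySem.Set.ofList_append_singleton]
        simp [PySem.Set.add, PySem.Set.contains, h, PySem.Set.mem_ofList]
      rw [hd]
      refine ih.imp_of_mem (fun {a b} ha hb hab => ?_)
      have ha' : a ∈ l := by simpa [PySem.List.mem_dedup] using ha
      have hb' : b ∈ l := by simpa [PySem.List.mem_dedup] using hb
      rwa [List.idxOf_append, List.idxOf_append, if_pos ha', if_pos hb']
    · have hd : PySem.List.dedup (l ++ [c0]) = PySem.List.dedup l ++ [c0] := by
        simp only [PySem.List.dedup_eq_ofList, PySem.Set.ofList_append_singleton]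
        simp [PySem.Set.add, PySem.Set.contains, h, PySem.Set.mem_ofList]
      rw [hd, List.pairwise_append]
      refine ⟨?_, List.pairwise_singleton _ _, ?_⟩
      · refine ih.imp_of_mem (fun {a b} ha hb hab => ?_)
        have ha' : a ∈ l := by simpa [PySem.List.mem_dedup] using ha
        have hb' : b ∈ l := by simpa [PySem.List.mem_dedup] using hb
        rwa [List.idxOf_append, List.idxOf_append, if_pos ha', if_pos hb']
      · intro a ha b hb
        have hb0 : b = c0 := by simpa using hb
        have ha' : a ∈ l := by simpa [PySem.List.mem_dedup] using ha
        subst hb0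
        rw [List.idxOf_append, List.idxOf_append, if_pos ha', if_neg h]
        have := List.idxOf_lt_length_of_mem ha'
        simp
        omega

theorem pvRank_getD (l : List Int) (hnd : l.Nodup) (k : Nat) (hk : k < l.length) :
    ((PySem.List.enumerate l 0).foldl pvStepRank PySem.Dict.empty).getD l[k] 0 = (k : Int) := by
  have hfresh : ∀ a ∈ PySem.List.enumerate l 0, (PySem.Dict.empty : PySem.Dict Int Int).contains a.2 = false := by
    intro a _; simp [PySem.Dict.empty, PySem.Dict.contains]
  have hnd2 : ((PySem.List.enumerate l 0).map (fun p => p.2)).Nodup := by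
    rw [PySem.List.map_snd_enumerate]; exact hnd
  have hitems := PySem.Dict.items_foldl_insert_fresh (PySem.List.enumerate l 0)
      (fun p => p.2) (fun p => p.1) PySem.Dict.empty hfresh hnd2
  have hbody : (PySem.List.enumerate l 0).foldl (fun d a => d.insert a.2 a.1) PySem.Dict.empty
      = (PySem.List.enumerate l 0).foldl pvStepRank PySem.Dict.empty := rfl
  rw [hbody] at hitems
  have hempty : (PySem.Dict.empty : PySem.Dict Int Int).items = [] := rfl
  rw [hempty, List.nil_append] at hitems
  have hmem : (l[k], (k : Int)) ∈ ((PySem.List.enumerate l 0).foldl pvStepRank PySem.Dict.empty).items := by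
    rw [hitems]
    refine List.mem_map.2 ⟨((k : Int), l[k]), ?_, rfl⟩
    rw [PySem.List.mem_enumerate_iff]
    exact ⟨k, hk, by simp⟩
  refine PySem.Dict.getD_of_mem_items _ hmem ?_ 0
  have : ((PySem.List.enumerate l 0).foldl pvStepRank PySem.Dict.empty).keys
      = (PySem.List.enumerate l 0).map (fun p => p.2) := by
    rw [PySem.Dict.keys, hitems, List.map_map]; rfl
  rw [this]; exact hnd2

theorem pvB_eq_spec (vector1 vector2 : List Int) :
    get_ensemble_state_alt vector1 vector2 = pvSpecOut (pvCombos vector1 vector2) := by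
  have halt : get_ensemble_state_alt vector1 vector2
      = (PySem.List.pyRange 0 (vector1.length : Int) 1).map (fun i =>
          ((PySem.List.enumerate (PySem.List.sorted
              (((PySem.List.pyRange ((vector1.length : Int) - 1) (-1) (-1)).foldl
                (pvStepFirst vector1 vector2) PySem.Dict.empty).values) (fun x => x) false) 0).foldl
              pvStepRank PySem.Dict.empty).getD
            (((PySem.List.pyRange ((vector1.length : Int) - 1) (-1) (-1)).foldl
                (pvStepFirst vector1 vector2) PySem.Dict.empty).getD
              (PySem.List.pyGetD vector1 i 0, PySem.List.pyGetD vector2 i 0) 0) 0) := rfl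
  rw [halt]
  set n : Int := (vector1.length : Int) with hn
  set cs := pvCombos vector1 vector2 with hcs
  set D := PySem.List.dedup cs with hD
  set g : (Int × Int) → Int := fun c => ((cs.idxOf c : Nat) : Int) with hg
  set R := PySem.List.pyRange 0 n 1 with hR
  have hn0 : 0 ≤ n := by simp [hn]
  have hcslen : PySem.List.len cs = n := by
    simp [PySem.List.len, hcs, pvCombos, PySem.List.length_pyRange_one]
    omega
  have hrev : PySem.List.pyRange (n - 1) (-1) (-1) = R.reverse := by
    rw [PySem.List.pyRange_neg_one_eq_reverse]
    norm_num
    rw [hR]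
  set first := (PySem.List.pyRange (n - 1) (-1) (-1)).foldl (pvStepFirst vector1 vector2) PySem.Dict.empty with hfirst
  set L : List ((Int × Int) × Int) := R.map (fun i => (pvCombo vector1 vector2 i, i)) with hL
  have hfold : first = (L.reverse).foldl (fun d p => d.insert p.1 p.2) PySem.Dict.empty := by
    rw [hfirst, hrev, hL, ← List.map_reverse, List.foldl_map]
    rfl
  have hLe : L = (PySem.List.enumerate cs 0).map (fun p => (p.2, p.1)) := by
    rw [PySem.List.enumerate_eq_map_pyRange cs (0, 0), hcslen, List.map_map, hL, ← hR]
    refine (List.map_congr_left (fun i hi => ?_)).symm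
    have hb := PySem.List.mem_pyRange_one.1 (by rwa [hR] at hi)
    have hgd : PySem.List.pyGetD cs i (0, 0) = pvCombo vector1 vector2 i := by
      rw [hcs, pvCombos]
      exact PySem.List.pyGetD_map_pyRange_of_nonneg (pvCombo vector1 vector2) n i (0, 0) hb.1 hb.2
    simp [hgd]
  have hget : ∀ c ∈ cs, first.get? c = some (g c) := by
    intro c hc
    rw [hfold, pvRevInsert_get? L PySem.Dict.empty c, hLe, pvEnumFind cs 0 c hc]
    simp [hg]
  have hgetD : ∀ c ∈ cs, first.getD c 0 = g c := by
    intro c hc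
    rw [PySem.Dict.getD_eq_get?_getD, hget c hc]
    rfl
  have hkeys : first.keys = PySem.Set.ofList cs.reverse := by
    have h1 : first = (R.reverse).foldl
        (fun d x => d.insert (pvCombo vector1 vector2 x) ((fun (_ : PySem.Dict (Int × Int) Int) (x : Int) => x) d x)) PySem.Dict.empty := by
      rw [hfirst, hrev]; rfl
    rw [h1, PySem.Dict.keys_foldl_insert_key]
    rw [show (PySem.Dict.empty : PySem.Dict (Int × Int) Int).keys = [] from rfl]
    rw [PySem.Set.update, ← PySem.Set.ofList_eq_foldl, List.map_reverse, hcs]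
    rfl
  have hknodup : first.keys.Nodup := by rw [hkeys]; exact PySem.Set.nodup_ofList _
  have hkmem : ∀ c, c ∈ first.keys ↔ c ∈ cs := by
    intro c
    rw [hkeys, PySem.Set.mem_ofList, List.mem_reverse]
  have hvals : first.values = first.keys.map g := by
    rw [PySem.Dict.values_eq_map_keys first hknodup 0]
    exact List.map_congr_left (fun k hk => hgetD k ((hkmem k).1 hk))
  have hperm : (D.map g).Perm first.values := by
    rw [hvals]
    refine List.Perm.map g ?_
    refine (List.perm_ext_iff_of_nodup (PySem.List.nodup_dedup cs) hknodup).2 ?_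
    intro a
    rw [PySem.List.mem_dedup, hkmem]
  have hpw : (D.map g).Pairwise (fun a b => a < b) := by
    rw [List.pairwise_map]
    exact (pvDedup_pairwise cs).imp (fun h => by simpa [hg] using h)
  have hsorted : PySem.List.sorted first.values (fun x => x) false = D.map g :=
    PySem.List.sorted_eq_of_perm_of_pairwise_lt _ _ _ hperm hpw
  have hlnodup : (D.map g).Nodup := hpw.nodup
  rw [hsorted]
  have hout : ∀ i ∈ R,
      ((PySem.List.enumerate (D.map g) 0).foldl pvStepRank PySem.Dict.empty).getD
        (first.getD (PySem.List.pyGetD vector1 i 0, PySem.List.pyGetD vector2 i 0) 0) 0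
      = ((D.idxOf (pvCombo vector1 vector2 i) : Nat) : Int) := by
    intro i hi
    have hc : pvCombo vector1 vector2 i ∈ cs := by
      rw [hcs, pvCombos]
      exact List.mem_map.2 ⟨i, by rwa [← hR], rfl⟩
    set c := pvCombo vector1 vector2 i with hcdef
    have hcD : c ∈ D := by rw [hD, PySem.List.mem_dedup]; exact hc
    have hk : D.idxOf c < D.length := List.idxOf_lt_length_of_mem hcD
    have hk2 : D.idxOf c < (D.map g).length := by rwa [List.length_map]
    have hgd : first.getD (PySem.List.pyGetD vector1 i 0, PySem.List.pyGetD vector2 i 0) 0 = g c := hgetD c hc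
    rw [hgd, show g c = (D.map g)[D.idxOf c] by rw [List.getElem_map]; congr 1; exact (List.getElem_idxOf hk).symm]
    exact pvRank_getD (D.map g) hlnodup (D.idxOf c) hk2
  rw [List.map_congr_left hout, pvSpecOut, ← hD, hcs, pvCombos, List.map_map, ← hR]
  rfl

-- ===== VERDICT (by name: the statement is the Claim_ definition above) =====
theorem get_ensemble_state_spec : Claim_equal_get_ensemble_state := by
  intro v1 v2 _ _
  unfold Spec_get_ensemble_state
  rw [pvA_eq_spec, pvB_eq_spec]
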